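-- pv_equiv track=rewrite | github.com/Abstractigakis/aoc-2022 | 8/a.py | checkVisibleTreesFromTop
-- ===== SOURCE A (Python) =====
-- def checkVisibleTreesFromTop(X):
--     visibleTrees = set()
--     for j in range(len(X[0])):
--         tallestTree = -1
--         for i in range(len(X)):
--             if X[i][j] > tallestTree:
--                 tallestTree = X[i][j]
--                 visibleTrees.add((i,j))
--     return visibleTrees
-- ===== SOURCE B (Python) =====
-- def checkVisibleTreesFromTop(X):
--     cols = list(zip(*X))
--     return {(i, j)
--             for j, col in enumerate(cols)
--             for i in range(len(col))
--             if col[i] > max((-1, *col[:i]))}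
-- ===== Notes on version B (the rewrite author's own statement) =====
-- stated objective: idiomatic
-- what changed: Replaced the mutable running-max scan over index pairs by a declarative set comprehension over the transposed grid (zip(*X)): a cell is visible iff it exceeds the max of the column prefix above it (with -1 floored in), so no state is threaded between iterations.
import Mathlib
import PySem

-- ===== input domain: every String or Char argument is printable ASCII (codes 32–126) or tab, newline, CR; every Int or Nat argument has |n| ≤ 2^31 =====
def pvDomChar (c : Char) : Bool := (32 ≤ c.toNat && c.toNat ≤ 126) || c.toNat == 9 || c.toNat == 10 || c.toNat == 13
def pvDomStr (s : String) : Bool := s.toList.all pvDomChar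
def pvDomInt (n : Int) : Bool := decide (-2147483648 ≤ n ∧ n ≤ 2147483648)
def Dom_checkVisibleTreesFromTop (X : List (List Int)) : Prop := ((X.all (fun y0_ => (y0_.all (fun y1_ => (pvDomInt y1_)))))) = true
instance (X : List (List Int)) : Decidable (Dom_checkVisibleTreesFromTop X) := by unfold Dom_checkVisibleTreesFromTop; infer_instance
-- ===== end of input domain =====

-- B replaces A's stateful running-max scan by a stateless set comprehension over the transposed grid (zip(*X)); return values agree on Pre_.

-- ===== PORT A =====
-- X[i][j] as A indexes it; the default 0 is never reached under Pre_.
def pvIdx (X : List (List Int)) (i j : Int) : Int :=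
  PySem.List.pyGetD (PySem.List.pyGetD X i []) j 0

def checkVisibleTreesFromTop (X : List (List Int)) : List (Int × Int) :=
  (PySem.List.pyRange 0 (PySem.List.len (PySem.List.pyGetD X 0 [])) 1).foldl
    (fun vt j =>
      ((PySem.List.pyRange 0 (PySem.List.len X) 1).foldl
        (fun (st : Int × PySem.Set (Int × Int)) i =>
          if pvIdx X i j > st.1 then (pvIdx X i j, PySem.Set.add st.2 (i, j)) else st)
        (-1, vt)).2)
    PySem.Set.empty

-- ===== PORT B =====
-- list(zip(*X)) as column lists: as many columns as the shortest row; row.getD never hits its default there.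
def pvZipStar (X : List (List Int)) : List (List Int) :=
  (List.range (((X.map List.length).min?).getD 0)).map (fun j => X.map (fun row => row.getD j 0))

-- max((-1, *col[:i])) is ported as the fold of Int.max over col[:i] started at -1 (exact: Python max of ints).
def checkVisibleTreesFromTop_alt (X : List (List Int)) : List (Int × Int) :=
  PySem.Set.ofList <|
    (PySem.List.enumerate (pvZipStar X)).flatMap (fun jc =>
      (List.range jc.2.length).filterMap (fun i =>
        if jc.2.getD i 0 > (jc.2.take i).foldl max (-1) then some (((i : Nat) : Int), jc.1) else none))

-- ===== PRECONDITION & SPEC =====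
-- Pre_ excludes exactly the inputs where Python A raises IndexError: empty X (X[0]) or a row shorter than row 0.
def Pre_checkVisibleTreesFromTop (X : List (List Int)) : Prop :=
  X ≠ [] ∧ ∀ row ∈ X, (X.headD []).length ≤ row.length
instance (X : List (List Int)) : Decidable (Pre_checkVisibleTreesFromTop X) := by
  unfold Pre_checkVisibleTreesFromTop; infer_instance
def pvWitness_checkVisibleTreesFromTop : List (List Int) := [[3, 0], [1, 4]]
def Spec_checkVisibleTreesFromTop (X : List (List Int)) (out : List (Int × Int)) : Prop := out = checkVisibleTreesFromTop_alt X
instance (X : List (List Int)) (out : List (Int × Int)) : Decidable (Spec_checkVisibleTreesFromTop X out) := by unfold Spec_checkVisibleTreesFromTop; infer_instance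

-- ===== CLAIM (what is proved, stated in full; the proofs are below) =====
def Claim_equal_checkVisibleTreesFromTop : Prop := ∀ (X : List (List Int)), Dom_checkVisibleTreesFromTop X → Pre_checkVisibleTreesFromTop X → Spec_checkVisibleTreesFromTop X (checkVisibleTreesFromTop X)

-- ===== LEMMAS AND PROOFS =====

-- the per-column list of visible cells, phrased with A's indexing (prefix-max test)
def pvColList (X : List (List Int)) (j : Int) : List (Int × Int) :=
  (PySem.List.pyRange 0 (PySem.List.len X) 1).filterMap (fun i =>
    if ((PySem.List.pyRange 0 i 1).map (fun k => pvIdx X k j)).foldl max (-1) < pvIdx X i j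
    then some (i, j) else none)

-- A's inner loop: the running max is the prefix max, and the set grows by pvColList
lemma pvInnerEq (X : List (List Int)) (j : Int) (n : Nat) (acc : PySem.Set (Int × Int)) :
    (PySem.List.pyRange 0 (n : Int) 1).foldl
        (fun (st : Int × PySem.Set (Int × Int)) i =>
          if pvIdx X i j > st.1 then (pvIdx X i j, PySem.Set.add st.2 (i, j)) else st)
        (-1, acc)
    = (((PySem.List.pyRange 0 (n : Int) 1).map (fun i => pvIdx X i j)).foldl max (-1),
       PySem.Set.update acc
        ((PySem.List.pyRange 0 (n : Int) 1).filterMap (fun i =>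
          if ((PySem.List.pyRange 0 i 1).map (fun k => pvIdx X k j)).foldl max (-1) < pvIdx X i j
          then some (i, j) else none))) := by
  induction n with
  | zero => simp [PySem.List.pyRange]
  | succ m ih =>
    have hcast : ((m + 1 : Nat) : Int) = ((m : Nat) : Int) + 1 := by push_cast; ring
    rw [hcast, PySem.List.pyRange_one_succ_right (by omega)]
    simp only [List.foldl_append, List.map_append, List.filterMap_append]
    rw [ih]
    simp only [List.foldl_cons, List.foldl_nil, List.map_cons, List.map_nil,
      List.filterMap_cons, List.filterMap_nil]
    by_cases hc : ((PySem.List.pyRange 0 (m : Int) 1).map (fun i => pvIdx X i j)).foldl max (-1)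
        < pvIdx X (m : Int) j
    · rw [if_pos hc, if_pos hc]
      have : max (((PySem.List.pyRange 0 (m : Int) 1).map (fun i => pvIdx X i j)).foldl max (-1))
          (pvIdx X (m : Int) j) = pvIdx X (m : Int) j := by omega
      simp [this, PySem.Set.update]
    · rw [if_neg hc, if_neg hc]
      have : max (((PySem.List.pyRange 0 (m : Int) 1).map (fun i => pvIdx X i j)).foldl max (-1))
          (pvIdx X (m : Int) j)
          = ((PySem.List.pyRange 0 (m : Int) 1).map (fun i => pvIdx X i j)).foldl max (-1) := by omega
      simp [this]

-- folding update over a list of columns is one update by the concatenation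
lemma pvFoldlUpdate (L : Int → List (Int × Int)) (js : List Int) (s : PySem.Set (Int × Int)) :
    js.foldl (fun s j => PySem.Set.update s (L j)) s = PySem.Set.update s (js.flatMap L) := by
  induction js generalizing s with
  | nil => simp [PySem.Set.update]
  | cons j js ih => simp [List.flatMap_cons, PySem.Set.update_append, ih]

-- under Pre_, zip(*X) yields exactly headD-many columns, each the column of X
lemma pvZipStarEq (X : List (List Int)) (hPre : Pre_checkVisibleTreesFromTop X) :
    pvZipStar X = (List.range (X.headD []).length).map (fun j => X.map (fun row => row.getD j 0)) := by
  obtain ⟨hne, hlen⟩ := hPre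
  have hmem : (X.headD []).length ∈ X.map List.length := by
    cases X with
    | nil => exact absurd rfl hne
    | cons r rs => simp
  have hmin : (X.map List.length).min? = some (X.headD []).length :=
    (List.min?_eq_some_iff).mpr ⟨hmem, by simpa using fun r hr => hlen r hr⟩
  unfold pvZipStar
  rw [hmin]
  rfl

-- one column's visible list: A's prefix-max test over pyRange equals B's over List.range
lemma pvColEq (X : List (List Int)) (k : Nat)
    (hk : ∀ row ∈ X, k < row.length) :
    pvColList X (k : Int)
    = (List.range (X.map (fun row => row.getD k 0)).length).filterMap (fun i =>
        if (X.map (fun row => row.getD k 0)).getD i 0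
            > ((X.map (fun row => row.getD k 0)).take i).foldl max (-1)
        then some (((i : Nat) : Int), (k : Int)) else none) := by
  unfold pvColList
  rw [PySem.List.len_eq, PySem.List.pyRange_zero_natCast, List.filterMap_map, List.length_map]
  apply List.filterMap_congr
  intro i hi
  have hi' : i < X.length := List.mem_range.mp hi
  have hidx : pvIdx X (i : Int) (k : Int) = (X.map (fun row => row.getD k 0)).getD i 0 := by
    unfold pvIdx
    rw [PySem.List.pyGetD_natCast, PySem.List.pyGetD_natCast, List.getD_eq_getElem X [] hi',
      List.getD_eq_getElem (X.map (fun row => row.getD k 0)) 0 (by simpa using hi'),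
      List.getElem_map]
  have hpre : (PySem.List.pyRange 0 (i : Int) 1).map (fun l => pvIdx X l (k : Int))
      = ((X.map (fun row => row.getD k 0)).take i) := by
    rw [PySem.List.pyRange_zero_natCast, List.map_map]
    apply List.ext_getElem
    · simp [List.length_take]
      omega
    · intro l h1 h2
      have hl : l < i := by simpa using h1
      have hlX : l < X.length := by omega
      simp only [List.getElem_map, List.getElem_range, Function.comp_apply,
        List.getElem_take]
      unfold pvIdx
      rw [PySem.List.pyGetD_natCast, PySem.List.pyGetD_natCast,
        List.getD_eq_getElem X [] hlX, List.getD_eq_getElem _ 0]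
      have := hk (X[l]) (List.getElem_mem hlX)
      simpa using this
  simp only [Function.comp_apply]
  rw [hidx, hpre]

-- ===== VERDICT (by name: the statement is the Claim_ definition above) =====
theorem checkVisibleTreesFromTop_spec : Claim_equal_checkVisibleTreesFromTop := by
  intro X hdom hPre
  obtain ⟨hne, hlen⟩ := hPre
  unfold Spec_checkVisibleTreesFromTop checkVisibleTreesFromTop checkVisibleTreesFromTop_alt
  -- A side: rewrite the nested fold into ofList of a flatMap of pvColList
  have hstep :
      (fun (vt : PySem.Set (Int × Int)) (j : Int) =>
        ((PySem.List.pyRange 0 (PySem.List.len X) 1).foldl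
          (fun (st : Int × PySem.Set (Int × Int)) i =>
            if pvIdx X i j > st.1 then (pvIdx X i j, PySem.Set.add st.2 (i, j)) else st)
          (-1, vt)).2)
      = (fun (vt : PySem.Set (Int × Int)) (j : Int) => PySem.Set.update vt (pvColList X j)) := by
    funext vt j
    rw [PySem.List.len_eq, pvInnerEq X j X.length vt]
    rfl
  rw [hstep, pvFoldlUpdate, PySem.Set.update_empty]
  -- B side: unfold zip(*X) into columns and align both flatMaps over List.range
  have hhead : PySem.List.pyGetD X 0 [] = X.headD [] := by
    rw [show (0 : Int) = ((0 : Nat) : Int) from rfl, PySem.List.pyGetD_natCast]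
    cases X <;> rfl
  have hcols := pvZipStarEq X ⟨hne, hlen⟩
  rw [hhead, hcols, PySem.List.enumerate_eq_map_pyRange _ ([] : List Int)]
  simp only [PySem.List.len_eq, List.length_map, List.length_range,
    PySem.List.pyRange_zero_natCast, List.map_map, List.flatMap_map]
  congr 1
  apply List.flatMap_congr
  intro k hkmem
  have hk : k < (X.headD []).length := List.mem_range.mp hkmem
  have hkrow : ∀ row ∈ X, k < row.length := fun row hr => lt_of_lt_of_le hk (hlen row hr)
  have hcol : PySem.List.pyGetD ((List.range (X.headD []).length).map
        (fun j => X.map (fun row => row.getD j 0))) ((k : Nat) : Int) []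
      = X.map (fun row => row.getD k 0) := by
    rw [PySem.List.pyGetD_natCast, List.getD_eq_getElem _ [] (by simpa using hk),
      List.getElem_map, List.getElem_range]
  simp only [Function.comp_apply]
  rw [hcol]
  exact pvColEq X k hkrow
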